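-- pv_equiv track=rewrite | github.com/ChenXiDiong/MonashProjects | FIT2004 - Algorithms and Data Structures/Week2-radixsort.py | stable_counting_sort_alpha
-- ===== SOURCE A (Python) =====
-- import math
--
-- def stable_counting_sort_alpha(a_list, col):
--     """
--     Uses a list of lists (count_array) to keep track of items in a_list, and then sorts the list by retrieving the items in order from count_array.
--
--     Precondition : a_list must have at least 1 item
--
--     :Input:
--         a_list: An unsorted list of characters.
--
--     :Output: A sorted version of a_list
--
--     :Time complexity: O(M+N), where N is the number of items in the input list, and M is the number of lists in count_array. The worst case happens when all the items
--     in the input list are unique, therefore it will require O(M) time to append every item into count_array. Finding the maximum in the list requires O(N) time, therefore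
--     the overall time complexity will be O(M) + O(N) = O(M+N).
--
--     :Auxiliary space complexity: O(M+N), where N is the number of items in the the input list, and M is the number of unique items in the input list. There will always be
--     N items to sort, which has space complexity of O(N), and M arrays created in count_array, which has a space complexity of O(M). Therefore the total auxiliary space
--     complexity is O(M) + O(N) = O(M+N).
--     """
--     #find the maximum
--     curr_max = -math.inf
--     for item in a_list:
--         if col < len(item):
--             item = (ord(item[col]) - 65)
--             if item > curr_max:
--                 curr_max = item
--
--     #initialize count array
--     count_array = [None] * (curr_max + 1) #[[]] * (curr_max + 1) makes copies of the same list
--     for i in range(len(count_array)):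
--         count_array[i] = [] #ensures every list created is a new, separate list
--
--     #update count array
--     for item in a_list:
--         if col < len(item):
--             index = (ord(item[col]) - 65)
--             count_array[index].append(item)
--         else:
--             count_array[0].append(item)
--
--     #update input array
--     index = 0
--     for nlist in count_array:
--         for item in nlist:
--             a_list[index] = item
--             index += 1
--
--     #a_list will be sorted
--     return a_list
-- ===== SOURCE B (Python) =====
-- def stable_counting_sort_alpha(a_list, col):
--     """Textbook counting sort on the column key: integer tallies, prefix sums
--     into start positions, then one stable forward placement pass.  Mutates
--     a_list in place and returns it, like the original."""
--     def key(item):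
--         return ord(item[col]) - 65 if col < len(item) else 0
--
--     size = max(key(item) for item in a_list if col < len(item)) + 1
--
--     counts = [0] * size
--     for item in a_list:
--         counts[key(item)] += 1
--
--     starts = [0] * size
--     for b in range(1, size):
--         starts[b] = starts[b - 1] + counts[b - 1]
--
--     output = [None] * len(a_list)
--     for item in a_list:
--         output[starts[key(item)]] = item
--         starts[key(item)] += 1
--
--     a_list[:] = output
--     return a_list
-- ===== Notes on version B (the rewrite author's own statement) =====
-- stated objective: alternative
-- what changed: Replaces A's count_array of per-bucket item lists (append into bucket lists, then copy buckets back) by the textbook counting sort: an integer tally array, a prefix-sum pass turning tallies into start positions, and one stable forward placement pass into a fresh output array.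
import Mathlib
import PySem

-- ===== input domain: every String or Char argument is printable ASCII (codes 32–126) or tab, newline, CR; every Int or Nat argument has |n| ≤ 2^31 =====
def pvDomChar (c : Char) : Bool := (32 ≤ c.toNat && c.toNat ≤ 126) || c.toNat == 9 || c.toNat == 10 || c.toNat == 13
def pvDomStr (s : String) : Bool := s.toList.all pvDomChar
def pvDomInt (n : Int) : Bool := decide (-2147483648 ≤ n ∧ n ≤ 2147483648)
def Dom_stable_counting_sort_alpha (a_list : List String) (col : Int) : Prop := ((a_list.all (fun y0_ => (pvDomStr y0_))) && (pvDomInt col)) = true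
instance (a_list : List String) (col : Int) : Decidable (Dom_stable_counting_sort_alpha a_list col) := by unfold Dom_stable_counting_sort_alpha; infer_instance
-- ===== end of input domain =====

-- B replaces A's count_array of per-bucket item lists by the textbook counting sort:
-- integer tallies, prefix sums into start positions, one stable forward placement pass
-- (objective: alternative). A mutates a_list in place and returns it; the equivalence
-- proved here is about the RETURN value (B mirrors the mutation via a_list[:] = ...).

-- ===== PORT A =====
-- 'curr_max' starts at -math.inf: modelled as Option Int with none = -inf.
def pvMaxStep (col : Int) (m : Option Int) (item : String) : Option Int :=
  if col < PySem.Str.len item then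
    match PySem.Str.pyGet? item col with
    | some c =>
      let k : Int := (c.toNat : Int) - 65
      match m with
      | none => some k
      | some mv => if k > mv then some k else some mv
    | none => m  -- Python raises IndexError on item[col] here; excluded by Pre_
  else m

-- 'count_array[index].append(item)' : read the bucket at the (possibly negative) Int index,
-- write the extended bucket back at the same index; 'none' = IndexError, excluded by Pre_.
def pvBucketStep (col : Int) (ca : List (List String)) (item : String) : List (List String) :=
  if col < PySem.Str.len item then
    match PySem.Str.pyGet? item col with
    | some c =>
      let index : Int := (c.toNat : Int) - 65
      match PySem.List.pyGet? ca index with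
      | some nlist => PySem.List.pySetD ca index (nlist ++ [item])
      | none => ca  -- IndexError; excluded by Pre_
    | none => ca    -- IndexError on item[col]; excluded by Pre_
  else
    match PySem.List.pyGet? ca 0 with
    | some nlist => PySem.List.pySetD ca 0 (nlist ++ [item])
    | none => ca    -- IndexError (empty count_array); excluded by Pre_

def stable_counting_sort_alpha (a_list : List String) (col : Int) : List String :=
  -- find the maximum
  match a_list.foldl (pvMaxStep col) none with
  | none => a_list  -- Python raises TypeError on (-inf + 1); excluded by Pre_
  | some cm =>
    -- initialize count array ((cm+1) fresh empty lists), update it, then write the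
    -- buckets' items back into a_list at positions 0,1,2,...
    ((a_list.foldl (pvBucketStep col) (List.replicate (cm + 1).toNat [])).foldl
      (fun (st : List String × Nat) nlist =>
        nlist.foldl (fun (st : List String × Nat) item => (st.1.set st.2 item, st.2 + 1)) st)
      (a_list, 0)).1

-- ===== PORT B =====
-- Source B's local 'key(item)'; '.elim 0' is reached only where Python raises IndexError
-- on item[col], which Pre_ excludes.
def pvKeyB (col : Int) (item : String) : Int :=
  if col < PySem.Str.len item then
    (PySem.Str.pyGet? item col).elim 0 (fun c => (c.toNat : Int) - 65)
  else 0

-- 'counts[key(item)] += 1' : read at the (possibly negative) Int index, write back;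
-- 'none' = IndexError, excluded by Pre_.
def pvTallyStep (col : Int) (cnt : List Int) (item : String) : List Int :=
  match PySem.List.pyGet? cnt (pvKeyB col item) with
  | some v => PySem.List.pySetD cnt (pvKeyB col item) (v + 1)
  | none => cnt

-- 'starts[b] = starts[b-1] + counts[b-1]' (b ranges over 1..size-1, all in range)
def pvStartStep (cnt : List Int) (st : List Int) (b : Int) : List Int :=
  match PySem.List.pyGet? st (b - 1), PySem.List.pyGet? cnt (b - 1) with
  | some s, some c => PySem.List.pySetD st b (s + c)
  | _, _ => st

-- 'output[starts[key(item)]] = item; starts[key(item)] += 1'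
def pvPlaceStep (col : Int) (st_out : List Int × List String) (item : String) : List Int × List String :=
  match PySem.List.pyGet? st_out.1 (pvKeyB col item) with
  | some p => (PySem.List.pySetD st_out.1 (pvKeyB col item) (p + 1),
               PySem.List.pySetD st_out.2 p item)
  | none => st_out

def stable_counting_sort_alpha_alt (a_list : List String) (col : Int) : List String :=
  match PySem.List.max? ((a_list.filter (fun it => decide (col < PySem.Str.len it))).map (pvKeyB col)) (fun k => k) with
  | none => a_list  -- Python: ValueError from max() of an empty generator; excluded by Pre_
  | some m =>
    let size := m + 1
    let counts := a_list.foldl (pvTallyStep col) (List.replicate size.toNat 0)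
    let starts := (PySem.List.pyRange 1 size 1).foldl (pvStartStep counts) (List.replicate size.toNat 0)
    -- output = [None] * len(a_list): "" placeholders; on inputs admitted by Pre_
    -- every slot is overwritten before being read
    (a_list.foldl (pvPlaceStep col) (starts, List.replicate a_list.length "")).2

-- ===== PRECONDITION & SPEC =====
-- the bucket key of one item (meaningful when col is a valid index into item)
def pvKey (col : Int) (item : String) : Int :=
  (PySem.Str.pyGet? item col).elim 0 (fun c => (c.toNat : Int) - 65)

-- the keys of the items with col < len(item), in order
def pvQualKeys (a_list : List String) (col : Int) : List Int :=
  (a_list.filter (fun it => decide (col < PySem.Str.len it))).map (pvKey col)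

def pvMaxKey (a_list : List String) (col : Int) : Int :=
  match pvQualKeys a_list col with
  | [] => 0
  | k :: t => t.foldl max k

-- Pre_ excludes exactly the inputs where A raises: no item reaches column col
-- (TypeError on -inf+1), some item[col] access is out of range (IndexError), or some
-- bucket index falls below -(max+1) (IndexError on count_array[index]).
def Pre_stable_counting_sort_alpha (a_list : List String) (col : Int) : Prop :=
  pvQualKeys a_list col ≠ [] ∧
  (∀ it ∈ a_list, col < PySem.Str.len it → (PySem.Str.pyGet? it col).isSome = true) ∧
  (∀ k ∈ pvQualKeys a_list col, -(pvMaxKey a_list col) - 1 ≤ k)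
instance (a_list : List String) (col : Int) : Decidable (Pre_stable_counting_sort_alpha a_list col) := by
  unfold Pre_stable_counting_sort_alpha; infer_instance

def pvWitness_stable_counting_sort_alpha : List String × Int := (["BX", "AY", ""], 0)

def Spec_stable_counting_sort_alpha (a_list : List String) (col : Int) (out : List String) : Prop := out = stable_counting_sort_alpha_alt a_list col
instance (a_list : List String) (col : Int) (out : List String) : Decidable (Spec_stable_counting_sort_alpha a_list col out) := by unfold Spec_stable_counting_sort_alpha; infer_instance

-- ===== CLAIM (what is proved, stated in full; the proofs are below) =====
def Claim_equal_stable_counting_sort_alpha : Prop := ∀ (a_list : List String) (col : Int), Dom_stable_counting_sort_alpha a_list col → Pre_stable_counting_sort_alpha a_list col → Spec_stable_counting_sort_alpha a_list col (stable_counting_sort_alpha a_list col)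


-- ===== LEMMAS AND PROOFS =====

-- the final (wrapped) bucket position of an item, for count-array size K
def pvPos (col K : Int) (it : String) : Nat := (PySem.Int.mod (pvKeyB col it) K).toNat

def pvOptMax (m : Option Int) (k : Int) : Option Int :=
  some (match m with | none => k | some mv => max mv k)

lemma pv_maxfold_eq (col : Int) (l : List String)
    (hS : ∀ it ∈ l, col < PySem.Str.len it → (PySem.Str.pyGet? it col).isSome = true) :
    ∀ m, l.foldl (pvMaxStep col) m = (pvQualKeys l col).foldl pvOptMax m := by
  induction l with
  | nil => intro m; simp [pvQualKeys]
  | cons x t ih =>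
    intro m
    have hxt : ∀ it ∈ t, col < PySem.Str.len it → (PySem.Str.pyGet? it col).isSome = true :=
      fun it hit => hS it (List.mem_cons_of_mem _ hit)
    by_cases hq : col < PySem.Str.len x
    · obtain ⟨c, hc⟩ := Option.isSome_iff_exists.mp (hS x (List.mem_cons_self ..) hq)
      have hq' : col < (x.length : Int) := by simpa using hq
      have hc' : PySem.List.pyGet? x.toList col = some c := by simpa using hc
      have hk : pvKey col x = (c.toNat : Int) - 65 := by simp [pvKey, hc']
      have hlenx : PySem.Str.len x = (x.length : Int) := by simp
      have hstep : pvMaxStep col m x = pvOptMax m (pvKey col x) := by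
        rcases m with _ | mv
        · simp [pvMaxStep, pvOptMax, hq, hq', hc, hc', hk]
        · have hthis : pvMaxStep col (some mv) x
              = if mv < (c.toNat : Int) - 65 then some ((c.toNat : Int) - 65) else some mv := by
            simp [pvMaxStep, hq', hc']
          rw [hthis, hk]
          show _ = some (max mv ((c.toNat : Int) - 65))
          by_cases hgt : mv < (c.toNat : Int) - 65
          · rw [if_pos hgt, max_eq_right (by omega)]
          · rw [if_neg hgt, max_eq_left (by omega)]
      have hcons : pvQualKeys (x :: t) col = pvKey col x :: pvQualKeys t col := by
        simp [pvQualKeys, List.filter_cons, hq']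
      rw [List.foldl_cons, hstep, hcons, List.foldl_cons, ih hxt]
    · have hq' : ¬ col < (x.length : Int) := by simpa using hq
      have hstep : pvMaxStep col m x = m := by simp [pvMaxStep, hq, hq']
      have hcons : pvQualKeys (x :: t) col = pvQualKeys t col := by
        simp [pvQualKeys, List.filter_cons, hq']
      rw [List.foldl_cons, hstep, hcons, ih hxt]

lemma pv_optmax_fold (ks : List Int) : ∀ a, ks.foldl pvOptMax (some a) = some (ks.foldl max a) := by
  induction ks with
  | nil => intro a; simp
  | cons k t ih => intro a; rw [List.foldl_cons, show pvOptMax (some a) k = some (max a k) from rfl,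
      List.foldl_cons, ih]

lemma pv_set_range_map {α : Type} (n : Nat) (g : Nat → α) (p : Nat) (v : α) :
    ((List.range n).map g).set p v = (List.range n).map (fun i => if i = p then v else g i) := by
  apply List.ext_getElem (by simp)
  intro i h1 h2
  simp only [List.length_map, List.length_range] at h1
  by_cases hip : i = p <;>
    simp [List.getElem_set, List.getElem_map, List.getElem_range, hip, eq_comm]

lemma pv_get_range_map {α : Type} (n : Nat) (g : Nat → α) (p : Nat) (hp : p < n) :
    ((List.range n).map g)[p]? = some (g p) := by
  simp [List.getElem?_map, List.getElem?_range hp]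

lemma pv_pySetD_neg {α : Type} (xs : List α) (k : Nat) (h1 : 0 < k) (h2 : k ≤ xs.length) (v : α) :
    PySem.List.pySetD xs (-(k : Int)) v = xs.set (xs.length - k) v := by
  simp only [PySem.List.pySetD, PySem.List.pySet?, PySem.List.pyIdx?]
  rw [if_neg (by omega), if_pos (by omega)]
  have h3 : ((- -(k : Int))).toNat = k := by omega
  simp [h3]

-- reduce the 'count_array[index].append(item)' pattern once the read is known to succeed
lemma pv_appendAt (col : Int) (ca : List (List String)) (x : String) (c : Char)
    (hq : col < PySem.Str.len x) (hc : PySem.Str.pyGet? x col = some c) (bl : List String)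
    (hget : PySem.List.pyGet? ca ((c.toNat : Int) - 65) = some bl) :
    pvBucketStep col ca x = PySem.List.pySetD ca ((c.toNat : Int) - 65) (bl ++ [x]) := by
  unfold pvBucketStep
  rw [if_pos hq, hc]
  show (match PySem.List.pyGet? ca ((c.toNat : Int) - 65) with
        | some nlist => PySem.List.pySetD ca ((c.toNat : Int) - 65) (nlist ++ [x])
        | none => ca) = _
  rw [hget]

lemma pv_appendAt0 (col : Int) (ca : List (List String)) (x : String)
    (hq : ¬ col < PySem.Str.len x) (bl : List String)
    (hget : PySem.List.pyGet? ca 0 = some bl) :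
    pvBucketStep col ca x = PySem.List.pySetD ca 0 (bl ++ [x]) := by
  unfold pvBucketStep
  rw [if_neg hq]
  show (match PySem.List.pyGet? ca 0 with
        | some nlist => PySem.List.pySetD ca 0 (nlist ++ [x])
        | none => ca) = _
  rw [hget]

lemma pv_map_if_eta {α : Type} (n p : Nat) (g : Nat → α) (f : Nat → α) :
    (List.range n).map (fun i => if i = p then f p else g i)
      = (List.range n).map (fun i => if i = p then f i else g i) := by
  apply List.map_congr_left
  intro j _
  by_cases hj : j = p <;> simp [hj]

lemma pv_bucketStep_map (col K : Int) (hK : 0 < K) (g : Nat → List String) (x : String)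
    (hsome : col < PySem.Str.len x → (PySem.Str.pyGet? x col).isSome = true)
    (hlo : -K ≤ pvKeyB col x) (hhi : pvKeyB col x < K) :
    pvBucketStep col ((List.range K.toNat).map g) x
      = (List.range K.toNat).map (fun i => if i = pvPos col K x then g i ++ [x] else g i) := by
  have hlenmap : (((List.range K.toNat).map g) : List (List String)).length = K.toNat := by simp
  by_cases hq : col < PySem.Str.len x
  · obtain ⟨c, hc⟩ := Option.isSome_iff_exists.mp (hsome hq)
    have hq' : col < (x.length : Int) := by simpa using hq
    have hc' : PySem.List.pyGet? x.toList col = some c := by simpa using hc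
    have hd : pvKeyB col x = (c.toNat : Int) - 65 := by simp [pvKeyB, hq, hq', hc']
    have hlo' : -K ≤ (c.toNat : Int) - 65 := hd ▸ hlo
    have hhi' : (c.toNat : Int) - 65 < K := hd ▸ hhi
    by_cases hnn : (0:Int) ≤ (c.toNat : Int) - 65
    · have hmod : PySem.Int.mod ((c.toNat : Int) - 65) K = (c.toNat : Int) - 65 := by
        rw [PySem.Int.mod_eq_emod_of_pos hK]
        exact Int.emod_eq_of_lt (by omega) (by omega)
      have hpos : pvPos col K x = ((c.toNat : Int) - 65).toNat := by
        unfold pvPos; rw [hd, hmod]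
      have hlt : ((c.toNat : Int) - 65).toNat < K.toNat := by omega
      have hget : PySem.List.pyGet? ((List.range K.toNat).map g) ((c.toNat : Int) - 65)
          = some (g (((c.toNat : Int) - 65).toNat)) := by
        rw [PySem.List.pyGet?_of_nonneg _ hnn, pv_get_range_map _ _ _ hlt]
      rw [pv_appendAt col _ x c hq hc _ hget, PySem.List.pySetD_of_nonneg _ _ hnn,
        pv_set_range_map, hpos]
      exact pv_map_if_eta _ _ g (fun i => g i ++ [x])
    · obtain ⟨k, hkeq⟩ : ∃ k : Nat, ((65 - (c.toNat : Int))).toNat = k := ⟨_, rfl⟩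
      have hik : (c.toNat : Int) - 65 = -(k : Int) := by omega
      have hk1 : 0 < k := by omega
      have hkK : k ≤ K.toNat := by omega
      have hmod : PySem.Int.mod ((c.toNat : Int) - 65) K = (c.toNat : Int) - 65 + K := by
        have h2 := Int.add_mul_emod_self_left (a := (c.toNat : Int) - 65) (b := K) (c := 1)
        rw [mul_one] at h2
        rw [PySem.Int.mod_eq_emod_of_pos hK, ← h2]
        exact Int.emod_eq_of_lt (by omega) (by omega)
      have hpos : pvPos col K x = K.toNat - k := by
        unfold pvPos; rw [hd, hmod]; omega
      have hget : PySem.List.pyGet? ((List.range K.toNat).map g) ((c.toNat : Int) - 65)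
          = some (g (K.toNat - k)) := by
        rw [hik, PySem.List.pyGet?_neg_natCast _ k hk1 (by rw [hlenmap]; omega), hlenmap]
        exact pv_get_range_map _ _ _ (by omega)
      rw [pv_appendAt col _ x c hq hc _ hget, hik, pv_pySetD_neg _ k hk1 (by rw [hlenmap]; omega),
        hlenmap, pv_set_range_map, hpos]
      exact pv_map_if_eta _ _ g (fun i => g i ++ [x])
  · have hq' : ¬ col < (x.length : Int) := by simpa using hq
    have hd : pvKeyB col x = 0 := by simp [pvKeyB, hq, hq']
    have hpos : pvPos col K x = 0 := by
      unfold pvPos; rw [hd, PySem.Int.mod_eq_emod_of_pos hK]; simp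
    have hget : PySem.List.pyGet? ((List.range K.toNat).map g) 0 = some (g 0) := by
      rw [PySem.List.pyGet?_of_nonneg _ (by omega)]
      exact pv_get_range_map _ _ _ (by omega)
    rw [pv_appendAt0 col _ x hq _ hget, PySem.List.pySetD_of_nonneg _ _ (by omega),
      pv_set_range_map, hpos]
    exact pv_map_if_eta _ _ g (fun i => g i ++ [x])

lemma pv_bucket_fold (col K : Int) (hK : 0 < K) :
    ∀ (l : List String) (g : Nat → List String),
    (∀ x ∈ l, (col < PySem.Str.len x → (PySem.Str.pyGet? x col).isSome = true)
        ∧ -K ≤ pvKeyB col x ∧ pvKeyB col x < K) →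
    l.foldl (pvBucketStep col) ((List.range K.toNat).map g)
      = (List.range K.toNat).map (fun i => g i ++ l.filter (fun x => pvPos col K x == i)) := by
  intro l
  induction l with
  | nil => intro g _; simp
  | cons x t ih =>
    intro g hl
    obtain ⟨hx1, hx2, hx3⟩ := hl x (List.mem_cons_self ..)
    rw [List.foldl_cons, pv_bucketStep_map col K hK g x hx1 hx2 hx3,
      ih _ (fun y hy => hl y (List.mem_cons_of_mem _ hy))]
    apply List.map_congr_left
    intro i _
    by_cases hip : pvPos col K x = i
    · simp [List.filter_cons, hip, List.append_assoc]
    · have hip' : ¬ i = pvPos col K x := fun h => hip h.symm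
      simp [List.filter_cons, hip, hip']

lemma pv_sum_ind (n b : Nat) (hb : b < n) :
    ((List.range n).map (fun i => if b = i then (1:Nat) else 0)).sum = 1 := by
  induction n with
  | zero => omega
  | succ m ih =>
    rw [List.range_succ, List.map_append, List.sum_append]
    by_cases hbm : b = m
    · subst hbm
      have hz : ((List.range b).map (fun i => if b = i then (1:Nat) else 0))
          = (List.range b).map (fun _ => 0) := by
        apply List.map_congr_left
        intro i hi
        have := List.mem_range.mp hi
        simp; omega
      simp [hz]
    · have hblt : b < m := by omega
      simp [ih hblt, hbm]

lemma pv_buckets_length (col K : Int) (l : List String)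
    (hl : ∀ x ∈ l, pvPos col K x < K.toNat) :
    ((List.range K.toNat).map (fun i => (l.filter (fun x => pvPos col K x == i)).length)).sum
      = l.length := by
  induction l with
  | nil => simp
  | cons x t ih =>
    have h1 : ∀ i ∈ List.range K.toNat,
        (List.filter (fun y => pvPos col K y == i) (x :: t)).length
          = (if pvPos col K x = i then (1:Nat) else 0)
              + (t.filter (fun y => pvPos col K y == i)).length := by
      intro i _
      by_cases h : pvPos col K x = i <;> simp [List.filter_cons, h] <;> omega
    rw [List.map_congr_left h1, List.sum_map_add, pv_sum_ind _ _ (hl x (List.mem_cons_self ..)),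
      ih (fun y hy => hl y (List.mem_cons_of_mem _ hy))]
    simp [Nat.add_comm]

lemma pv_write_fold (ys : List String) : ∀ (xs : List String) (p : Nat),
    p + ys.length ≤ xs.length →
    (ys.foldl (fun (st : List String × Nat) it => (st.1.set st.2 it, st.2 + 1)) (xs, p)).1
      = xs.take p ++ ys ++ xs.drop (p + ys.length) := by
  induction ys with
  | nil => intro xs p h; simp [List.take_append_drop]
  | cons y t ih =>
    intro xs p h
    have hp : p < xs.length := by simp at h; omega
    have hA : (xs.take p).length = p := by simp; omega
    have hrec := ih (xs.set p y) (p + 1) (by simp at h ⊢; omega)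
    simp only [List.foldl_cons]
    rw [hrec]
    have hset : xs.set p y = xs.take p ++ y :: xs.drop (p + 1) := by
      rw [List.set_eq_take_append_cons_drop, if_pos hp]
    have htake : (xs.set p y).take (p + 1) = xs.take p ++ [y] := by
      rw [hset, List.take_append, hA]
      simp [List.take_take]
    have hdrop : (xs.set p y).drop (p + 1 + t.length) = xs.drop (p + 1 + t.length) := by
      rw [List.drop_set, if_pos (by omega)]
    rw [htake, hdrop, show p + (y :: t).length = p + 1 + t.length from by simp; omega]
    simp [List.append_assoc]

lemma pv_qual_mem (a_list : List String) (col : Int) (it : String) (hit : it ∈ a_list)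
    (hq : col < PySem.Str.len it) : pvKey col it ∈ pvQualKeys a_list col := by
  unfold pvQualKeys
  exact List.mem_map_of_mem (List.mem_filter.mpr ⟨hit, by simpa using hq⟩)

lemma pv_le_max (a_list : List String) (col : Int) :
    ∀ j ∈ pvQualKeys a_list col, j ≤ pvMaxKey a_list col := by
  cases hqk : pvQualKeys a_list col with
  | nil => simp
  | cons k0 t0 =>
    intro j hj
    have hMval : pvMaxKey a_list col = t0.foldl max k0 := by simp [pvMaxKey, hqk]
    rcases List.mem_cons.mp hj with h | h
    · subst h; rw [hMval]; exact (PySem.List.le_foldl_max t0 j).1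
    · rw [hMval]; exact (PySem.List.le_foldl_max t0 k0).2 j h

lemma pv_M_nonneg (a_list : List String) (col : Int)
    (hpre : Pre_stable_counting_sort_alpha a_list col) : 0 ≤ pvMaxKey a_list col := by
  obtain ⟨hne, _, hlow⟩ := hpre
  cases hqk : pvQualKeys a_list col with
  | nil => exact absurd hqk hne
  | cons k0 t0 =>
    have hmem : k0 ∈ pvQualKeys a_list col := by rw [hqk]; exact List.mem_cons_self ..
    have h1 := hlow k0 hmem
    have h2 := pv_le_max a_list col k0 hmem
    omega

lemma pv_keyB_eq_key (col : Int) (x : String) (hq : col < PySem.Str.len x) :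
    pvKeyB col x = pvKey col x := by
  unfold pvKeyB pvKey
  rw [if_pos hq]

lemma pv_bound_all (a_list : List String) (col : Int)
    (hpre : Pre_stable_counting_sort_alpha a_list col) : ∀ x ∈ a_list,
    (col < PySem.Str.len x → (PySem.Str.pyGet? x col).isSome = true)
      ∧ -(pvMaxKey a_list col + 1) ≤ pvKeyB col x ∧ pvKeyB col x < pvMaxKey a_list col + 1 := by
  have hM0 := pv_M_nonneg a_list col hpre
  obtain ⟨hne, hS, hlow⟩ := hpre
  intro x hx
  refine ⟨hS x hx, ?_, ?_⟩ <;> by_cases hq : col < PySem.Str.len x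
  · have h := hlow _ (pv_qual_mem a_list col x hx hq)
    rw [pv_keyB_eq_key col x hq]; omega
  · simp only [pvKeyB, if_neg hq]; omega
  · have h := pv_le_max a_list col _ (pv_qual_mem a_list col x hx hq)
    rw [pv_keyB_eq_key col x hq]; omega
  · simp only [pvKeyB, if_neg hq]; omega

lemma pv_pos_lt (a_list : List String) (col : Int)
    (hpre : Pre_stable_counting_sort_alpha a_list col) : ∀ x ∈ a_list,
    pvPos col (pvMaxKey a_list col + 1) x < (pvMaxKey a_list col + 1).toNat := by
  have hM0 := pv_M_nonneg a_list col hpre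
  intro x _
  have h1 := PySem.Int.mod_nonneg (pvKeyB col x) (b := pvMaxKey a_list col + 1) (by omega)
  have h2 := PySem.Int.mod_lt (pvKeyB col x) (b := pvMaxKey a_list col + 1) (by omega)
  unfold pvPos; omega

lemma pv_curr_max (a_list : List String) (col : Int)
    (hpre : Pre_stable_counting_sort_alpha a_list col) :
    a_list.foldl (pvMaxStep col) none = some (pvMaxKey a_list col) := by
  obtain ⟨hne, hS, _⟩ := hpre
  cases hqk : pvQualKeys a_list col with
  | nil => exact absurd hqk hne
  | cons k0 t0 =>
    rw [pv_maxfold_eq col a_list hS none, hqk, List.foldl_cons,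
      show pvOptMax none k0 = some k0 from rfl, pv_optmax_fold]
    simp [pvMaxKey, hqk]

-- A's result, in per-bucket filter form
lemma pv_A_flatten (a_list : List String) (col : Int)
    (hpre : Pre_stable_counting_sort_alpha a_list col) :
    stable_counting_sort_alpha a_list col
      = List.flatten ((List.range (pvMaxKey a_list col + 1).toNat).map
          (fun i => a_list.filter (fun x => pvPos col (pvMaxKey a_list col + 1) x == i))) := by
  have hM0 := pv_M_nonneg a_list col hpre
  have hK : (0:Int) < pvMaxKey a_list col + 1 := by omega
  simp only [stable_counting_sort_alpha, pv_curr_max a_list col hpre]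
  rw [show List.replicate (pvMaxKey a_list col + 1).toNat ([] : List String)
      = (List.range (pvMaxKey a_list col + 1).toNat).map (fun _ => []) from by
    rw [List.map_const', List.length_range]]
  rw [pv_bucket_fold col _ hK a_list (fun _ => []) (pv_bound_all a_list col hpre)]
  simp only [List.nil_append]
  rw [← List.foldl_flatten]
  have hlen : (List.flatten ((List.range (pvMaxKey a_list col + 1).toNat).map
      (fun i => a_list.filter (fun x => pvPos col (pvMaxKey a_list col + 1) x == i)))).length
      = a_list.length := by
    rw [List.length_flatten, List.map_map]
    exact pv_buckets_length col _ a_list (pv_pos_lt a_list col hpre)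
  rw [pv_write_fold _ a_list 0 (by simp [hlen])]
  simp [hlen]

-- ========== B-side lemmas ==========

-- reading a range-map list at a possibly negative Python index wraps
lemma pv_wrap_get {α : Type} (K : Int) (hK : 0 < K) (g : Nat → α) (k : Int)
    (hlo : -K ≤ k) (hhi : k < K) :
    PySem.List.pyGet? ((List.range K.toNat).map g) k
      = some (g (PySem.Int.mod k K).toNat) := by
  by_cases hnn : (0:Int) ≤ k
  · have hmod : PySem.Int.mod k K = k := by
      rw [PySem.Int.mod_eq_emod_of_pos hK]
      exact Int.emod_eq_of_lt (by omega) (by omega)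
    rw [PySem.List.pyGet?_of_nonneg _ hnn, hmod]
    exact pv_get_range_map _ _ _ (by omega)
  · obtain ⟨j, hjeq⟩ : ∃ j : Nat, (-k).toNat = j := ⟨_, rfl⟩
    have hkj : k = -(j : Int) := by omega
    have hj1 : 0 < j := by omega
    have hmod : PySem.Int.mod k K = k + K := by
      have h2 := Int.add_mul_emod_self_left (a := k) (b := K) (c := 1)
      rw [mul_one] at h2
      rw [PySem.Int.mod_eq_emod_of_pos hK, ← h2]
      exact Int.emod_eq_of_lt (by omega) (by omega)
    have hres : (PySem.Int.mod k K).toNat = K.toNat - j := by rw [hmod]; omega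
    rw [hres, hkj, PySem.List.pyGet?_neg_natCast _ j hj1 (by simp; omega)]
    simp only [List.length_map, List.length_range]
    exact pv_get_range_map _ _ _ (by omega)

-- writing a range-map list at a possibly negative Python index wraps
lemma pv_wrap_set {α : Type} (K : Int) (hK : 0 < K) (g : Nat → α) (k : Int)
    (hlo : -K ≤ k) (hhi : k < K) (v : α) :
    PySem.List.pySetD ((List.range K.toNat).map g) k v
      = (List.range K.toNat).map (fun i => if i = (PySem.Int.mod k K).toNat then v else g i) := by
  by_cases hnn : (0:Int) ≤ k
  · have hmod : PySem.Int.mod k K = k := by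
      rw [PySem.Int.mod_eq_emod_of_pos hK]
      exact Int.emod_eq_of_lt (by omega) (by omega)
    rw [PySem.List.pySetD_of_nonneg _ _ hnn, pv_set_range_map, hmod]
  · obtain ⟨j, hjeq⟩ : ∃ j : Nat, (-k).toNat = j := ⟨_, rfl⟩
    have hkj : k = -(j : Int) := by omega
    have hj1 : 0 < j := by omega
    have hmod : PySem.Int.mod k K = k + K := by
      have h2 := Int.add_mul_emod_self_left (a := k) (b := K) (c := 1)
      rw [mul_one] at h2
      rw [PySem.Int.mod_eq_emod_of_pos hK, ← h2]
      exact Int.emod_eq_of_lt (by omega) (by omega)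
    have hres : (PySem.Int.mod k K).toNat = K.toNat - j := by rw [hmod]; omega
    rw [hres, hkj, pv_pySetD_neg _ j hj1 (by simp; omega)]
    simp only [List.length_map, List.length_range]
    rw [pv_set_range_map]

-- one tally step on a range-map count array
lemma pv_tallyStep_map (col K : Int) (hK : 0 < K) (g : Nat → Int) (x : String)
    (hlo : -K ≤ pvKeyB col x) (hhi : pvKeyB col x < K) :
    pvTallyStep col ((List.range K.toNat).map g) x
      = (List.range K.toNat).map (fun i => if i = pvPos col K x then g i + 1 else g i) := by
  unfold pvTallyStep
  rw [pv_wrap_get K hK g _ hlo hhi]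
  show PySem.List.pySetD ((List.range K.toNat).map g) (pvKeyB col x)
      (g (PySem.Int.mod (pvKeyB col x) K).toNat + 1) = _
  rw [pv_wrap_set K hK g _ hlo hhi]
  exact pv_map_if_eta K.toNat (pvPos col K x) g (fun i => g i + 1)

-- the whole tally loop: counts[b] = number of items in bucket b (plus what was there)
lemma pv_tally_fold (col K : Int) (hK : 0 < K) :
    ∀ (l : List String) (g : Nat → Int),
    (∀ x ∈ l, -K ≤ pvKeyB col x ∧ pvKeyB col x < K) →
    l.foldl (pvTallyStep col) ((List.range K.toNat).map g)
      = (List.range K.toNat).map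
          (fun i => g i + ((l.filter (fun x => pvPos col K x == i)).length : Int)) := by
  intro l
  induction l with
  | nil => intro g _; simp
  | cons x t ih =>
    intro g hl
    obtain ⟨hx2, hx3⟩ := hl x (List.mem_cons_self ..)
    rw [List.foldl_cons, pv_tallyStep_map col K hK g x hx2 hx3,
      ih _ (fun y hy => hl y (List.mem_cons_of_mem _ hy))]
    apply List.map_congr_left
    intro i _
    by_cases hip : pvPos col K x = i
    · simp [List.filter_cons, hip]; omega
    · have hip' : ¬ i = pvPos col K x := fun h => hip h.symm
      simp [List.filter_cons, hip, hip']

-- start position of bucket b: total size of the earlier buckets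
def pvBase (col K : Int) (l : List String) (b : Nat) : Nat :=
  ((List.range b).map (fun i => (l.filter (fun x => pvPos col K x == i)).length)).sum

lemma pv_base_succ (col K : Int) (l : List String) (b : Nat) :
    pvBase col K l (b + 1)
      = pvBase col K l b + (l.filter (fun x => pvPos col K x == b)).length := by
  unfold pvBase
  rw [List.range_succ, List.map_append, List.sum_append]
  simp

lemma pv_base_mono (col K : Int) (l : List String) : ∀ b b' : Nat, b ≤ b' →
    pvBase col K l b ≤ pvBase col K l b' := by
  intro b b' h
  obtain ⟨d, rfl⟩ := Nat.exists_eq_add_of_le h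
  clear h
  induction d with
  | zero => simp
  | succ m ih =>
    have := pv_base_succ col K l (b + m)
    have harith : b + (m + 1) = (b + m) + 1 := by omega
    rw [harith]
    omega

lemma pv_base_total (col K : Int) (l : List String)
    (hl : ∀ x ∈ l, pvPos col K x < K.toNat) :
    pvBase col K l K.toNat = l.length := by
  unfold pvBase
  exact pv_buckets_length col K l hl

-- the prefix-sum loop, peeled from the right end
lemma pv_start_partial (col K : Int) (hK : 0 < K) (l : List String)
    (counts : List Int)
    (hcnt : counts = (List.range K.toNat).map
        (fun i => ((l.filter (fun x => pvPos col K x == i)).length : Int))) :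
    ∀ n : Nat, n ≤ K.toNat - 1 →
    ((List.range n).map (fun (i : Nat) => ((i : Int) + 1))).foldl (pvStartStep counts)
        ((List.range K.toNat).map (fun _ => (0 : Int)))
      = (List.range K.toNat).map (fun i => if i ≤ n then (pvBase col K l i : Int) else 0) := by
  intro n
  induction n with
  | zero =>
    intro _
    simp only [List.range_zero, List.map_nil, List.foldl_nil]
    apply List.map_congr_left
    intro i _
    by_cases hi : i ≤ 0
    · have : i = 0 := by omega
      subst this
      simp [pvBase]
    · simp [hi]
  | succ m ih =>
    intro hm
    rw [List.range_succ, List.map_append, List.foldl_append, ih (by omega)]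
    simp only [List.map_cons, List.map_nil, List.foldl_cons, List.foldl_nil]
    unfold pvStartStep
    have hm1 : (m : Int) + 1 - 1 = (m : Int) := by ring
    have hmlt : m < K.toNat := by omega
    have hget1 : PySem.List.pyGet?
        ((List.range K.toNat).map (fun i => if i ≤ m then (pvBase col K l i : Int) else 0))
        ((m : Int) + 1 - 1) = some ((pvBase col K l m : Int)) := by
      rw [hm1, PySem.List.pyGet?_of_nonneg _ (by omega)]
      simp only [Int.toNat_natCast]
      rw [pv_get_range_map _ _ _ hmlt]
      simp
    have hget2 : PySem.List.pyGet? counts ((m : Int) + 1 - 1)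
        = some (((l.filter (fun x => pvPos col K x == m)).length : Int)) := by
      rw [hcnt, hm1, PySem.List.pyGet?_of_nonneg _ (by omega)]
      simp only [Int.toNat_natCast]
      rw [pv_get_range_map _ _ _ hmlt]
    rw [hget1, hget2]
    show PySem.List.pySetD
        ((List.range K.toNat).map (fun i => if i ≤ m then (pvBase col K l i : Int) else 0))
        ((m : Int) + 1)
        ((pvBase col K l m : Int) + ((l.filter (fun x => pvPos col K x == m)).length : Int)) = _
    have hs1 : ((m : Int) + 1) = (((m + 1 : Nat)) : Int) := by push_cast; ring
    rw [hs1, PySem.List.pySetD_of_nonneg _ _ (by positivity)]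
    simp only [Int.toNat_natCast]
    rw [pv_set_range_map]
    apply List.map_congr_left
    intro i _
    by_cases hi1 : i = m + 1
    · subst hi1
      rw [if_pos rfl, if_pos (le_refl _), pv_base_succ]
      push_cast; ring
    · rw [if_neg hi1]
      by_cases hi2 : i ≤ m
      · rw [if_pos hi2, if_pos (by omega)]
      · rw [if_neg hi2, if_neg (by omega)]

-- the start array after the whole prefix-sum loop
lemma pv_starts_eq (col K : Int) (hK : 0 < K) (l : List String)
    (counts : List Int)
    (hcnt : counts = (List.range K.toNat).map
        (fun i => ((l.filter (fun x => pvPos col K x == i)).length : Int))) :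
    (PySem.List.pyRange 1 K 1).foldl (pvStartStep counts)
        ((List.range K.toNat).map (fun _ => (0 : Int)))
      = (List.range K.toNat).map (fun i => (pvBase col K l i : Int)) := by
  have hr : PySem.List.pyRange 1 K 1
      = (List.range (K.toNat - 1)).map (fun (i : Nat) => ((i : Int) + 1)) := by
    rw [PySem.List.pyRange_one]
    have : (K - 1).toNat = K.toNat - 1 := by omega
    rw [this]
    apply List.map_congr_left
    intro i _
    push_cast
    ring
  rw [hr, pv_start_partial col K hK l counts hcnt _ (le_refl _)]
  apply List.map_congr_left
  intro i hi
  have := List.mem_range.mp hi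
  rw [if_pos (by omega)]

-- the placement loop: items of bucket b land, in order, at positions g b, g b + 1, …;
-- untouched positions keep their old contents
lemma pv_place_fold (col K : Int) (hK : 0 < K) :
    ∀ (l : List String) (g : Nat → Nat) (out : List String),
    (∀ x ∈ l, -K ≤ pvKeyB col x ∧ pvKeyB col x < K) →
    (∀ b, b < K.toNat → g b + (l.filter (fun x => pvPos col K x == b)).length ≤ out.length) →
    (∀ b b', b < K.toNat → b' < K.toNat → b ≠ b' →
        g b + (l.filter (fun x => pvPos col K x == b)).length ≤ g b'
          ∨ g b' + (l.filter (fun x => pvPos col K x == b')).length ≤ g b) →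
    ((l.foldl (pvPlaceStep col) ((List.range K.toNat).map (fun b => (g b : Int)), out)).2.length
        = out.length)
      ∧ (∀ b, b < K.toNat → ∀ i, i < (l.filter (fun x => pvPos col K x == b)).length →
          (l.foldl (pvPlaceStep col) ((List.range K.toNat).map (fun b => (g b : Int)), out)).2[g b + i]?
            = (l.filter (fun x => pvPos col K x == b))[i]?)
      ∧ (∀ p, p < out.length →
          (∀ b, b < K.toNat → p < g b ∨ g b + (l.filter (fun x => pvPos col K x == b)).length ≤ p) →
          (l.foldl (pvPlaceStep col) ((List.range K.toNat).map (fun b => (g b : Int)), out)).2[p]?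
            = out[p]?) := by
  intro l
  induction l with
  | nil =>
    intro g out _ _ _
    refine ⟨rfl, ?_, ?_⟩
    · intro b _ i hi; simp at hi
    · intro p _ _; rfl
  | cons x t ih =>
    intro g out hb hbound hdisj
    obtain ⟨hx2, hx3⟩ := hb x (List.mem_cons_self ..)
    have hb0lt : pvPos col K x < K.toNat := by
      have h1 := PySem.Int.mod_nonneg (pvKeyB col x) (b := K) hK
      have h2 := PySem.Int.mod_lt (pvKeyB col x) (b := K) hK
      unfold pvPos; omega
    set b0 := pvPos col K x with hb0
    -- filter over the cons
    have hfc : ∀ b : Nat, List.filter (fun y => pvPos col K y == b) (x :: t)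
        = (if b0 = b then [x] else []) ++ List.filter (fun y => pvPos col K y == b) t := by
      intro b
      by_cases hbb : b0 = b <;> simp [List.filter_cons, ← hb0, hbb]
    have hm0 : (List.filter (fun y => pvPos col K y == b0) (x :: t)).length
        = (List.filter (fun y => pvPos col K y == b0) t).length + 1 := by
      rw [hfc b0]; simp
    have hgb0 : g b0 < out.length := by
      have := hbound b0 hb0lt
      omega
    -- evaluate one step
    have hstep : pvPlaceStep col ((List.range K.toNat).map (fun b => (g b : Int)), out) x
        = ((List.range K.toNat).map
            (fun b => ((if b = b0 then g b + 1 else g b : Nat) : Int)),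
           out.set (g b0) x) := by
      have hmodpos : (PySem.Int.mod (pvKeyB col x) K).toNat = b0 := rfl
      have h1 : PySem.List.pySetD ((List.range K.toNat).map (fun b => (g b : Int)))
          (pvKeyB col x) ((g b0 : Int) + 1)
          = (List.range K.toNat).map
              (fun b => ((if b = b0 then g b + 1 else g b : Nat) : Int)) := by
        rw [pv_wrap_set K hK _ _ hx2 hx3, hmodpos]
        apply List.map_congr_left
        intro i _
        by_cases hi : i = b0
        · subst hi; rw [if_pos rfl, if_pos rfl]; push_cast; ring
        · rw [if_neg hi, if_neg hi]
      have h2 : PySem.List.pySetD out ((g b0 : Int)) x = out.set (g b0) x := by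
        rw [PySem.List.pySetD_of_nonneg _ _ (by positivity)]
        simp
      unfold pvPlaceStep
      rw [pv_wrap_get K hK _ _ hx2 hx3]
      show (PySem.List.pySetD ((List.range K.toNat).map (fun b => (g b : Int)))
              (pvKeyB col x) ((g b0 : Int) + 1),
            PySem.List.pySetD out ((g b0 : Int)) x) = _
      rw [h1, h2]
    -- hypotheses for the tail call with g' and out'
    have ihres := ih (fun b => if b = b0 then g b + 1 else g b) (out.set (g b0) x)
      (fun y hy => hb y (List.mem_cons_of_mem _ hy))
      (by
        intro b hbK
        have h1 := hbound b hbK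
        rw [hfc b] at h1
        by_cases hbb : b = b0
        · subst hbb; simp at h1 ⊢; omega
        · have : ¬ b0 = b := fun h => hbb h.symm
          simp [hbb, this] at h1 ⊢; omega)
      (by
        intro b b' hbK hb'K hne
        have h1 := hdisj b b' hbK hb'K hne
        rw [hfc b, hfc b'] at h1
        by_cases hbb : b = b0 <;> by_cases hbb' : b' = b0
        · omega
        · subst hbb
          have : ¬ b0 = b' := fun h => hbb' h.symm
          simp [this, hbb'] at h1 ⊢
          omega
        · subst hbb'
          have hne' : ¬ b = b0 := hbb
          simp [hne', fun h => hbb (h : b = b0)] at h1 ⊢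
          rcases h1 with h1 | h1
          · left; omega
          · right; omega
        · simp [hbb, hbb', fun h => hbb (h : b = b0), fun h => hbb' (h : b' = b0)] at h1 ⊢
          omega)
    obtain ⟨ihlen, ihbuck, ihold⟩ := ihres
    rw [List.foldl_cons, hstep]
    have houtlen : (out.set (g b0) x).length = out.length := by simp
    refine ⟨by rw [ihlen, houtlen], ?_, ?_⟩
    · -- bucket contents
      intro b hbK i hi
      by_cases hbb : b = b0
      · subst hbb
        rcases Nat.eq_zero_or_pos i with hi0 | hipos
        · subst hi0
          -- position g b0 holds x, untouched by the tail's writes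
          have huntouched : ∀ b', b' < K.toNat →
              g b0 + 0 < (if b' = b0 then g b' + 1 else g b')
                ∨ (if b' = b0 then g b' + 1 else g b')
                    + (List.filter (fun y => pvPos col K y == b') t).length ≤ g b0 + 0 := by
            intro b' hb'K
            by_cases hbb' : b' = b0
            · subst hbb'; left; rw [if_pos rfl]; omega
            · have h1 := hdisj b' b0 hb'K hb0lt hbb'
              rw [hfc b', hfc b0] at h1
              have : ¬ b0 = b' := fun h => hbb' h.symm
              simp [hbb', this] at h1
              rcases h1 with h1 | h1
              · right; simp [hbb']; omega
              · left; simp [hbb']; omega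
          have := ihold (g b0 + 0) (by rw [houtlen]; omega) huntouched
          rw [this]
          have hgetset : (out.set (g b0) x)[g b0 + 0]? = some x := by
            simp [List.getElem?_set_self, hgb0]
          rw [hgetset, hfc b0]
          simp
        · obtain ⟨j, hj⟩ : ∃ j, i = j + 1 := ⟨i - 1, by omega⟩
          subst hj
          have hjlt : j < (List.filter (fun y => pvPos col K y == b0) t).length := by
            rw [hm0] at hi; omega
          have := ihbuck b0 hb0lt j hjlt
          simp only [if_true] at this
          have harith : g b0 + 1 + j = g b0 + (j + 1) := by omega
          rw [harith] at this
          rw [this, hfc b0]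
          simp
      · have hfb : List.filter (fun y => pvPos col K y == b) (x :: t)
            = List.filter (fun y => pvPos col K y == b) t := by
          rw [hfc b, if_neg (fun h => hbb h.symm)]
          simp
        rw [hfb] at hi ⊢
        have := ihbuck b hbK i hi
        simp only [] at this
        rw [if_neg hbb] at this
        exact this
    · -- untouched positions
      intro p hp hout
      have hpne : p ≠ g b0 := by
        have := hout b0 hb0lt
        rw [hm0] at this
        omega
      have huntouched : ∀ b', b' < K.toNat →
          p < (if b' = b0 then g b' + 1 else g b')
            ∨ (if b' = b0 then g b' + 1 else g b')
                + (List.filter (fun y => pvPos col K y == b') t).length ≤ p := by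
        intro b' hb'K
        have h1 := hout b' hb'K
        rw [hfc b'] at h1
        by_cases hbb' : b' = b0
        · subst hbb'; simp at h1 ⊢; omega
        · have : ¬ b0 = b' := fun h => hbb' h.symm
          simp [hbb', this] at h1 ⊢; omega
      have := ihold p (by rw [houtlen]; omega) huntouched
      rw [this, List.getElem?_set_ne (Ne.symm hpne)]

-- indexing into a flatten at (offset of piece b) + i
lemma pv_flatten_get : ∀ (bs : List (List String)) (b : Nat), b < bs.length →
    ∀ i, i < (bs.getD b []).length →
    bs.flatten[((bs.take b).map List.length).sum + i]? = (bs.getD b [])[i]? := by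
  intro bs
  induction bs with
  | nil => intro b hb; simp at hb
  | cons hd tl ih =>
    intro b hb i hi
    cases b with
    | zero =>
      simp only [List.take_zero, List.map_nil, List.sum_nil, Nat.zero_add, List.flatten_cons,
        List.getD_cons_zero] at hi ⊢
      rw [List.getElem?_append_left hi]
    | succ m =>
      simp only [List.take_succ_cons, List.map_cons, List.sum_cons, List.flatten_cons,
        List.getD_cons_succ] at hi ⊢
      have harith : hd.length + (((tl.take m).map List.length).sum) + i
          = hd.length + ((((tl.take m).map List.length).sum) + i) := by omega
      rw [harith, List.getElem?_append_right (by omega)]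
      have : hd.length + (((tl.take m).map List.length).sum + i) - hd.length
          = ((tl.take m).map List.length).sum + i := by omega
      rw [this]
      exact ih m (by simpa using hb) i hi

-- each position below the total lies in exactly the interval of some bucket
lemma pv_find_bucket (col K : Int) (l : List String) :
    ∀ (N : Nat) (p : Nat), p < pvBase col K l N →
    ∃ b, b < N ∧ pvBase col K l b ≤ p
      ∧ p < pvBase col K l b + (l.filter (fun x => pvPos col K x == b)).length := by
  intro N
  induction N with
  | zero => intro p hp; simp [pvBase] at hp
  | succ m ih =>
    intro p hp
    rcases Nat.lt_or_ge p (pvBase col K l m) with hlt | hge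
    · obtain ⟨b, h1, h2, h3⟩ := ih p hlt
      exact ⟨b, by omega, h2, h3⟩
    · refine ⟨m, by omega, hge, ?_⟩
      rw [pv_base_succ] at hp
      omega

-- B's result, in the same per-bucket filter form as A's
lemma pv_B_flatten (a_list : List String) (col : Int)
    (hpre : Pre_stable_counting_sort_alpha a_list col) :
    stable_counting_sort_alpha_alt a_list col
      = List.flatten ((List.range (pvMaxKey a_list col + 1).toNat).map
          (fun i => a_list.filter (fun x => pvPos col (pvMaxKey a_list col + 1) x == i))) := by
  have hM0 := pv_M_nonneg a_list col hpre
  have hK : (0:Int) < pvMaxKey a_list col + 1 := by omega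
  set K := pvMaxKey a_list col + 1 with hKdef
  have hne := hpre.1
  have hS := hpre.2.1
  -- the generator's list of keys is pvQualKeys
  have hkeys : (a_list.filter (fun it => decide (col < PySem.Str.len it))).map (pvKeyB col)
      = pvQualKeys a_list col := by
    unfold pvQualKeys
    apply List.map_congr_left
    intro it hit
    exact pv_keyB_eq_key col it (by simpa using (List.mem_filter.mp hit).2)
  have hmax : PySem.List.max?
      ((a_list.filter (fun it => decide (col < PySem.Str.len it))).map (pvKeyB col)) (fun k => k)
      = some (pvMaxKey a_list col) := by
    rw [hkeys]
    cases hqk : pvQualKeys a_list col with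
    | nil => exact absurd hqk hne
    | cons k0 t0 => rw [PySem.List.max?_id_cons]; simp [pvMaxKey, hqk]
  simp only [stable_counting_sort_alpha_alt, hmax]
  rw [← hKdef]
  have hbd : ∀ x ∈ a_list, -K ≤ pvKeyB col x ∧ pvKeyB col x < K :=
    fun x hx => (pv_bound_all a_list col hpre x hx).2
  have hposlt := pv_pos_lt a_list col hpre
  -- counts
  have hcounts : a_list.foldl (pvTallyStep col) (List.replicate K.toNat 0)
      = (List.range K.toNat).map
          (fun i => ((a_list.filter (fun x => pvPos col K x == i)).length : Int)) := by
    rw [show List.replicate K.toNat (0:Int) = (List.range K.toNat).map (fun _ => 0) from by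
      rw [List.map_const', List.length_range]]
    rw [pv_tally_fold col K hK a_list (fun _ => 0) hbd]
    simp
  -- starts
  have hstarts := pv_starts_eq col K hK a_list _ rfl
  simp only [hcounts]
  rw [show List.replicate K.toNat (0:Int) = (List.range K.toNat).map (fun _ => (0:Int)) from by
    rw [List.map_const', List.length_range], hstarts]
  -- placement
  have hlenflat : (List.flatten ((List.range K.toNat).map
      (fun i => a_list.filter (fun x => pvPos col K x == i)))).length = a_list.length := by
    rw [List.length_flatten, List.map_map]
    exact pv_buckets_length col K a_list hposlt
  obtain ⟨hrlen, hrbuck, _⟩ := pv_place_fold col K hK a_list (pvBase col K a_list)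
    (List.replicate a_list.length "")
    hbd
    (by
      intro b hbK
      rw [List.length_replicate, ← pv_base_succ, ← pv_base_total col K a_list hposlt]
      exact pv_base_mono col K a_list _ _ (by omega))
    (by
      intro b b' hbK hb'K hne'
      rcases Nat.lt_or_ge b b' with hlt | hge
      · left; rw [← pv_base_succ]; exact pv_base_mono col K a_list _ _ (by omega)
      · right; rw [← pv_base_succ]; exact pv_base_mono col K a_list _ _ (by omega))
  apply List.ext_getElem?
  intro p
  by_cases hp : p < a_list.length
  · -- find the bucket containing p
    have hpb : p < pvBase col K a_list K.toNat := by
      rw [pv_base_total col K a_list hposlt]; exact hp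
    obtain ⟨b, hbK, hble, hblt⟩ := pv_find_bucket col K a_list K.toNat p hpb
    obtain ⟨i, hieq⟩ : ∃ i, p = pvBase col K a_list b + i := ⟨p - pvBase col K a_list b, by omega⟩
    have hilt : i < (a_list.filter (fun x => pvPos col K x == b)).length := by omega
    rw [hieq]
    rw [hrbuck b hbK i hilt]
    -- flatten side
    have hoff : (((List.range K.toNat).map
        (fun i => a_list.filter (fun x => pvPos col K x == i))).take b).map List.length
        = (List.range b).map (fun i => (a_list.filter (fun x => pvPos col K x == i)).length) := by
      rw [← List.map_take, List.take_range, min_eq_left (by omega : b ≤ K.toNat), List.map_map]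
      rfl
    have hgd : ((List.range K.toNat).map
        (fun i => a_list.filter (fun x => pvPos col K x == i))).getD b []
        = a_list.filter (fun x => pvPos col K x == b) := by
      rw [List.getD_eq_getElem?_getD]
      rw [pv_get_range_map _ _ _ hbK]
      rfl
    have := pv_flatten_get ((List.range K.toNat).map
        (fun i => a_list.filter (fun x => pvPos col K x == i))) b (by simpa using hbK) i
        (by rw [hgd]; exact hilt)
    rw [hoff, hgd] at this
    rw [← this]
    rfl
  · -- both out of range
    rw [List.getElem?_eq_none (by rw [hrlen, List.length_replicate]; omega),
      List.getElem?_eq_none (by rw [hlenflat]; omega)]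

-- ===== VERDICT (by name: the statement is the Claim_ definition above) =====
theorem stable_counting_sort_alpha_spec : Claim_equal_stable_counting_sort_alpha := by
  intro a_list col _hdom hpre
  unfold Spec_stable_counting_sort_alpha
  rw [pv_A_flatten a_list col hpre, pv_B_flatten a_list col hpre]
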